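-- pv_equiv track=rewrite | github.com/Gaintclout/internapp | backend/app/services/vscode_submit_logic.py | is_nextjs_project
-- ===== SOURCE A (Python) =====
-- def is_nextjs_project(code: str):
--
--     NEXTJS_MARKERS = [
--         "next",
--         "next.js",
--         "useState(",
--         "useEffect(",
--         "export default",
--         "import react"
--     ]
--
--     code_lower = code.lower()
--
--     return any(marker.lower() in code_lower for marker in NEXTJS_MARKERS)
-- ===== SOURCE B (Python) =====
-- def is_nextjs_project(code: str):
--     # Single left-to-right scan: at each position, test whether any (pre-lowered)
--     # marker starts there, instead of one full substring search per marker.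
--     markers = ["next", "next.js", "usestate(", "useeffect(", "export default", "import react"]
--     s = code.lower()
--     for i in range(len(s) + 1):
--         if any(s.startswith(m, i) for m in markers):
--             return True
--     return False
-- ===== Notes on version B (the rewrite author's own statement) =====
-- stated objective: alternative
-- what changed: Replaced the per-marker substring search (one full scan of the code per marker) by a single left-to-right scan over the lowercased code that tests at each position whether any pre-lowered marker starts there.
import Mathlib
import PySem

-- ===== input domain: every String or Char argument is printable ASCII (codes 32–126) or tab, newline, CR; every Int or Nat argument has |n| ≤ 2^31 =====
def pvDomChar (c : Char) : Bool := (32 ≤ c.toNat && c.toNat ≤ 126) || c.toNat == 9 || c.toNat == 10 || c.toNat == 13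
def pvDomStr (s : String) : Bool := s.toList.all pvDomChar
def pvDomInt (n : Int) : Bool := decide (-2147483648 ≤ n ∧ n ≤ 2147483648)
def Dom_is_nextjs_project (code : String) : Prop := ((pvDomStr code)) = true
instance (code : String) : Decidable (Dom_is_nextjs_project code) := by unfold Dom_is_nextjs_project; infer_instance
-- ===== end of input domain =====

-- B replaces A's per-marker substring searches by one left-to-right scan testing each suffix against all pre-lowered markers (alternative decomposition, same cost).

-- ===== PORT A =====
def is_nextjs_project (code : String) : Bool :=
  let markers : List String := ["next", "next.js", "useState(", "useEffect(", "export default", "import react"]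
  let code_lower := PySem.Str.lower code
  markers.any (fun m => PySem.Str.isIn (PySem.Str.lower m) code_lower)

-- ===== PORT B =====
def nextjsMarkersLower : List (List Char) :=
  ["next".toList, "next.js".toList, "usestate(".toList, "useeffect(".toList,
   "export default".toList, "import react".toList]

def nextjsScan : List Char → Bool
  | [] => nextjsMarkersLower.any (fun m => PySem.Chars.startswith [] m)
  | c :: t => nextjsMarkersLower.any (fun m => PySem.Chars.startswith (c :: t) m) || nextjsScan t

def is_nextjs_project_alt (code : String) : Bool :=
  nextjsScan (PySem.Str.lower code).toList

-- ===== PRECONDITION & SPEC =====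
def Spec_is_nextjs_project (code : String) (out : Bool) : Prop := out = is_nextjs_project_alt code
instance (code : String) (out : Bool) : Decidable (Spec_is_nextjs_project code out) := by unfold Spec_is_nextjs_project; infer_instance

-- ===== CLAIM (what is proved, stated in full; the proofs are below) =====
def Claim_equal_is_nextjs_project : Prop := ∀ (code : String), Dom_is_nextjs_project code → Spec_is_nextjs_project code (is_nextjs_project code)

-- ===== LEMMAS AND PROOFS =====

-- B's scan decides "some marker occurs as an infix".
theorem nextjsScan_eq_any_isIn (s : List Char) :
    nextjsScan s = nextjsMarkersLower.any (fun m => PySem.Chars.isIn m s) := by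
  induction s with
  | nil => decide
  | cons c t ih =>
      simp only [nextjsScan, ih]
      rw [Bool.eq_iff_iff]
      simp only [Bool.or_eq_true, List.any_eq_true, PySem.Chars.startswith_iff,
        PySem.Chars.isIn_iff_infix, List.infix_cons_iff]
      constructor
      · rintro (⟨m, hm, h⟩ | ⟨m, hm, h⟩) <;> exact ⟨m, hm, by tauto⟩
      · rintro ⟨m, hm, h | h⟩
        · exact Or.inl ⟨m, hm, h⟩
        · exact Or.inr ⟨m, hm, h⟩

-- ===== VERDICT (by name: the statement is the Claim_ definition above) =====
theorem is_nextjs_project_spec : Claim_equal_is_nextjs_project := by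
  intro code _
  unfold Spec_is_nextjs_project is_nextjs_project is_nextjs_project_alt
  rw [nextjsScan_eq_any_isIn]
  simp only [List.any_cons, List.any_nil, nextjsMarkersLower]
  norm_num [PySem.Str.isIn, PySem.Chars.isIn, PySem.Str.lower]
  rfl
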